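-- pv_equiv track=rewrite | github.com/kaenozu/day_trade | src/day_trade/data/version_management/utils.py | validate_branch_name
-- ===== SOURCE A (Python) =====
-- def validate_branch_name(branch_name: str) -> bool:
--     """
--     ブランチ名の妥当性検証
--
--     Args:
--         branch_name: 検証するブランチ名
--
--     Returns:
--         妥当性フラグ
--     """
--     if not branch_name or not isinstance(branch_name, str):
--         return False
--
--     if len(branch_name) < 1 or len(branch_name) > 50:
--         return False
--
--     # 基本的な命名規則チェック
--     invalid_chars = {" ", "\t", "\n", "\r", "/", "\\", ":", "*", "?", "\"", "<", ">", "|"}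
--     if any(char in branch_name for char in invalid_chars):
--         return False
--
--     return True
-- ===== SOURCE B (Python) =====
-- import re
--
-- _INVALID = re.compile(r'[ \t\n\r/\\:*?"<>|]')
--
-- def validate_branch_name(branch_name: str) -> bool:
--     if not isinstance(branch_name, str):
--         return False
--     if not (1 <= len(branch_name) <= 50):
--         return False
--     return _INVALID.search(branch_name) is None
-- ===== Notes on version B (the rewrite author's own statement) =====
-- stated objective: idiomatic
-- what changed: A probes the string 13 times (one containment scan per forbidden character); B makes a single regex pass over the string with a character class, and folds the empty/len<1 guards into one range check.
import Mathlib
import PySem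

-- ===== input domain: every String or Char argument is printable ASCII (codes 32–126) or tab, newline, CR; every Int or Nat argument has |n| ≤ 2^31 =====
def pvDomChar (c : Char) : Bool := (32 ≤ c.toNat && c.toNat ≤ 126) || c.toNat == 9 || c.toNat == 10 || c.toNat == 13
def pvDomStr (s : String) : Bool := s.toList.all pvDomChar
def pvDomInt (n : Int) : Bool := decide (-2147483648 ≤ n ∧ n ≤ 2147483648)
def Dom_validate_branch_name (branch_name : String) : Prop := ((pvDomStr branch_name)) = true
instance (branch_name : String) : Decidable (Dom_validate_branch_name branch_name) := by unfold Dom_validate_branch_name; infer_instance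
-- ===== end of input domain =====

-- B replaces A's 13 per-character containment scans by one left-to-right pass testing each char
-- against the forbidden class (Python: one regex search); same return value, idiomatic/simpler.

-- ===== PORT A =====
-- the set literal of invalid characters from A
def pvInvalidChars : List Char :=
  [' ', '\t', '\n', '\r', '/', '\\', ':', '*', '?', '"', '<', '>', '|']

def validate_branch_name (branch_name : String) : Bool :=
  -- `not branch_name` (falsy = empty string); isinstance is always true for String
  if branch_name.toList.length = 0 then false
  else if branch_name.toList.length < 1 ∨ branch_name.toList.length > 50 then false
  -- any(char in branch_name for char in invalid_chars)
  else if pvInvalidChars.any (fun c => branch_name.toList.contains c) then false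
  else true

-- ===== PORT B =====
-- membership in the regex character class [ \t\n\r/\\:*?"<>|]
def pvClassHit (c : Char) : Bool :=
  c == ' ' || c == '\t' || c == '\n' || c == '\r' || c == '/' || c == '\\' ||
  c == ':' || c == '*' || c == '?' || c == '"' || c == '<' || c == '>' || c == '|'

-- _INVALID.search(s) is None: one pass over the string
def pvSearchNone (s : String) : Bool := !(s.toList.any pvClassHit)

def validate_branch_name_alt (branch_name : String) : Bool :=
  if 1 ≤ branch_name.toList.length ∧ branch_name.toList.length ≤ 50 then
    pvSearchNone branch_name
  else false

-- ===== PRECONDITION & SPEC =====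
def Spec_validate_branch_name (branch_name : String) (out : Bool) : Prop := out = validate_branch_name_alt branch_name
instance (branch_name : String) (out : Bool) : Decidable (Spec_validate_branch_name branch_name out) := by unfold Spec_validate_branch_name; infer_instance

-- ===== CLAIM (what is proved, stated in full; the proofs are below) =====
def Claim_equal_validate_branch_name : Prop := ∀ (branch_name : String), Dom_validate_branch_name branch_name → Spec_validate_branch_name branch_name (validate_branch_name branch_name)

-- ===== LEMMAS AND PROOFS =====

-- the regex class tests exactly membership in A's set literal
theorem pvClassHit_eq (c : Char) : pvClassHit c = pvInvalidChars.contains c := by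
  rw [Bool.eq_iff_iff]
  simp [pvClassHit, pvInvalidChars]
  tauto

-- swapping the traversal: scanning the 13 chars for containment in s = scanning s for class hits
theorem any_swap (l : List Char) :
    pvInvalidChars.any (fun c => l.contains c) = l.any pvClassHit := by
  rw [Bool.eq_iff_iff]
  simp only [List.any_eq_true, List.contains_eq_mem, pvClassHit_eq, decide_eq_true_eq]
  constructor
  · rintro ⟨c, hc, hm⟩; exact ⟨c, hm, by simpa using hc⟩
  · rintro ⟨c, hc, hm⟩; exact ⟨c, by simpa using hm, by simpa using hc⟩

-- ===== VERDICT (by name: the statement is the Claim_ definition above) =====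
theorem validate_branch_name_spec : Claim_equal_validate_branch_name := by
  intro s _
  unfold Spec_validate_branch_name validate_branch_name validate_branch_name_alt pvSearchNone
  by_cases h0 : s.toList.length = 0
  · rw [if_pos h0, if_neg (by omega)]
  · rw [if_neg h0]
    by_cases h50 : s.toList.length ≤ 50
    · rw [if_neg (by omega), if_pos (by omega : 1 ≤ s.toList.length ∧ s.toList.length ≤ 50),
        any_swap]
      cases s.toList.any pvClassHit <;> simp
    · rw [if_pos (by omega), if_neg (by omega)]
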